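-- pv_equiv track=rewrite | github.com/CarlottaGiacchetta/EvolutionaryLTN | GAfull.py | find_main_comma
-- ===== SOURCE A (Python) =====
-- def find_main_comma(s):
--     """
--     Trova la posizione della virgola "principale" che separa left e right
--     tenendo conto di eventuali parentesi annidate.
--     """
--     depth = 0
--     for i, ch in enumerate(s):
--         if ch == "(":
--             depth += 1
--         elif ch == ")":
--             depth -= 1
--         elif ch == "," and depth == 0:
--             return i
--     # se non trovata virgola "principale", errore
--     raise ValueError(f"Virgola di separazione non trovata in: {s}")
-- ===== SOURCE B (Python) =====
-- def find_main_comma(s):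
--     # pass 1: per-char paren delta, then running depth *before* each position
--     deltas = [1 if ch == "(" else -1 if ch == ")" else 0 for ch in s]
--     depths = [0]
--     for d in deltas:
--         depths.append(depths[-1] + d)
--     # pass 2: locate the first top-level comma using the precomputed table
--     for i, ch in enumerate(s):
--         if ch == "," and depths[i] == 0:
--             return i
--     raise ValueError(f"Virgola di separazione non trovata in: {s}")
-- ===== Notes on version B (the rewrite author's own statement) =====
-- stated objective: alternative
-- what changed: B splits A's single stateful loop into two passes: it first builds a prefix-depth table (char deltas, then running sums), then scans the string for the first comma whose precomputed depth is 0; Pre_ excludes inputs with no top-level comma, on which both A and B raise ValueError.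
import Mathlib
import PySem

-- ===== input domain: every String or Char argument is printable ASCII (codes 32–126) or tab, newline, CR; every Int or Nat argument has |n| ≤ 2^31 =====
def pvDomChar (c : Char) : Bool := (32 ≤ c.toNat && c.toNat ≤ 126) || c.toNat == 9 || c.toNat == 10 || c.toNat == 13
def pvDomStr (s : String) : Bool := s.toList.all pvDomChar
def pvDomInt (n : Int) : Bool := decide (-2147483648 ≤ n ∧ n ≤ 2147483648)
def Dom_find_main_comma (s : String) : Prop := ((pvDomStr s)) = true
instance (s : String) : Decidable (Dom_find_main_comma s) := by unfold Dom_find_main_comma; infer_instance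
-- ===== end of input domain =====

-- B builds a prefix-depth table in one pass, then scans for the first depth-0 comma in a
-- second pass (same O(n) cost, different decomposition than A's single stateful loop).

-- ===== PORT A =====
-- A's loop: depth counter, return index at the first ',' seen at depth 0; none = ValueError.
def fmcA : List Char → Int → Int → Option Int
  | [], _, _ => none
  | c :: cs, i, depth =>
    if c = '(' then fmcA cs (i + 1) (depth + 1)
    else if c = ')' then fmcA cs (i + 1) (depth - 1)
    else if c = ',' ∧ depth = 0 then some i
    else fmcA cs (i + 1) depth

def find_main_comma (s : String) : Int :=
  (fmcA s.toList 0 0).getD 0   -- none = ValueError, excluded by Pre_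

-- ===== PORT B =====
-- deltas = [1 if ch=='(' else -1 if ch==')' else 0 for ch in s]
def fmcDeltas (cs : List Char) : List Int :=
  cs.map (fun c => if c = '(' then (1 : Int) else if c = ')' then -1 else 0)

-- depths = [0]; for d in deltas: depths.append(depths[-1] + d)
def fmcDepths : List Int → Int → List Int
  | [], cur => [cur]
  | d :: ds, cur => cur :: fmcDepths ds (cur + d)

-- for i, ch in enumerate(s): if ch == ',' and depths[i] == 0: return i
def fmcScan : List Char → List Int → Int → Option Int
  | c :: cs, dep :: deps, i =>
    if c = ',' ∧ dep = 0 then some i else fmcScan cs deps (i + 1)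
  | _, _, _ => none

def find_main_comma_alt (s : String) : Int :=
  (fmcScan s.toList (fmcDepths (fmcDeltas s.toList) 0) 0).getD 0   -- none = ValueError, excluded by Pre_

-- ===== PRECONDITION & SPEC =====
-- A (and B) raise ValueError when the string has no comma at parenthesis depth 0;
-- Pre_ admits exactly the strings that contain a top-level comma.
def Pre_find_main_comma (s : String) : Prop :=
  ∃ i, i < s.toList.length ∧ s.toList.getD i ' ' = ',' ∧
    (s.toList.take i).count '(' = (s.toList.take i).count ')'
instance (s : String) : Decidable (Pre_find_main_comma s) := by
  unfold Pre_find_main_comma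
  exact decidable_of_iff (∃ i ∈ List.range s.toList.length,
      s.toList.getD i ' ' = ',' ∧ (s.toList.take i).count '(' = (s.toList.take i).count ')')
    (by simp [List.mem_range])

def pvWitness_find_main_comma : String := "f(x,y),g"

def Spec_find_main_comma (s : String) (out : Int) : Prop := out = find_main_comma_alt s
instance (s : String) (out : Int) : Decidable (Spec_find_main_comma s out) := by unfold Spec_find_main_comma; infer_instance

-- ===== CLAIM (what is proved, stated in full; the proofs are below) =====
def Claim_equal_find_main_comma : Prop := ∀ (s : String), Dom_find_main_comma s → Pre_find_main_comma s → Spec_find_main_comma s (find_main_comma s)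

-- ===== LEMMAS AND PROOFS =====
-- The two ports agree on every input (found or not): A's fused loop equals
-- B's delta/prefix-sum/scan pipeline, by induction over the character list.
theorem fmcA_eq_scan (cs : List Char) : ∀ (i depth : Int),
    fmcA cs i depth = fmcScan cs (fmcDepths (fmcDeltas cs) depth) i := by
  induction cs with
  | nil => intro i depth; simp [fmcA, fmcScan]
  | cons c cs ih =>
    intro i depth
    by_cases h1 : c = '('
    · simp [fmcA, fmcDeltas, fmcDepths, fmcScan, h1, ih]
    · by_cases h2 : c = ')'
      · simp [fmcA, fmcDeltas, fmcDepths, fmcScan, h2, ih, sub_eq_add_neg]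
      · by_cases h3 : c = ',' ∧ depth = 0
        · simp [fmcA, fmcDeltas, fmcDepths, fmcScan, h3]
        · simp [fmcA, fmcDeltas, fmcDepths, fmcScan, h1, h2, h3, ih]

-- ===== VERDICT (by name: the statement is the Claim_ definition above) =====
theorem find_main_comma_spec : Claim_equal_find_main_comma := by
  intro s _ _
  unfold Spec_find_main_comma find_main_comma find_main_comma_alt
  rw [fmcA_eq_scan]
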